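-- pv_equiv track=rewrite | github.com/gibgibik/go-lineage2-cuda | python/main.py | merge_close_rects
-- ===== SOURCE A (Python) =====
-- def merge_close_rects(line, x_tol=10):
--     if not line:
--         return []
--     merged = [line[0]]
--     for rect in line[1:]:
--         last = merged[-1]
--         if rect[0] - last[2] <= x_tol:
--             merged[-1] = [
--                 min(last[0], rect[0]),
--                 min(last[1], rect[1]),
--                 max(last[2], rect[2]),
--                 max(last[3], rect[3]),
--             ]
--         else:
--             merged.append(rect)
--     return merged
-- ===== SOURCE B (Python) =====
-- def merge_close_rects(line, x_tol=10):
--     # Pass 1: split into groups of horizontally-close rects, tracking the running right edge.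
--     groups = []
--     for rect in line:
--         if groups and rect[0] - right <= x_tol:
--             groups[-1].append(rect)
--             right = max(right, rect[2])
--         else:
--             groups.append([rect])
--             right = rect[2]
--     # Pass 2: a singleton group passes through unchanged; a larger group becomes its bounding box.
--     out = []
--     for g in groups:
--         if len(g) == 1:
--             out.append(g[0])
--         else:
--             out.append([min(r[0] for r in g), min(r[1] for r in g),
--                         max(r[2] for r in g), max(r[3] for r in g)])
--     return out
-- ===== Notes on version B (the rewrite author's own statement) =====
-- stated objective: alternative
-- what changed: A folds left-to-right, rebuilding the last merged box pairwise at every step; B first partitions the line into groups of close rects using a running right edge, then emits each group in a second pass (singletons unchanged, larger groups as one min/max bounding box over the whole group).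
-- outside the precondition, e.g. on merge_close_rects([[0, 0, 0, 0], [100, 1]], 10): A returns [[0, 0, 0, 0], [100, 1]], B raises IndexError; on merge_close_rects([[5]], 10): A returns [[5]], B raises IndexError
import Mathlib
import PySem

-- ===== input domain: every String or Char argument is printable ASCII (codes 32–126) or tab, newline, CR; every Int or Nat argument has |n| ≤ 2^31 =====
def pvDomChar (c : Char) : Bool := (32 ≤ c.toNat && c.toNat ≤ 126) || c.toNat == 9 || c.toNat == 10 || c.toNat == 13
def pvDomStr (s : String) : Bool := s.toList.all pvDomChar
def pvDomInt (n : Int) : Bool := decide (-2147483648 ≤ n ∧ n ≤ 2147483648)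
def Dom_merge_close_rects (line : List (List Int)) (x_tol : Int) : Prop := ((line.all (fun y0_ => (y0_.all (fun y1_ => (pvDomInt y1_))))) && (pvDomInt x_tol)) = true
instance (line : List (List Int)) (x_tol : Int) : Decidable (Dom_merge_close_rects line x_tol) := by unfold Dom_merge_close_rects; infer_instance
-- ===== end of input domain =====

-- B replaces A's fold (which rebuilds the last merged box pairwise at every step) by a
-- two-pass decomposition: group close rects with a running right edge, then summarise
-- each group (singletons pass through unchanged). Objective: alternative decomposition.

-- rect[i] for i = 0..3; total with default 0 (inside Pre_ every rect has ≥ 4 entries)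
def pvIdx (r : List Int) (i : Nat) : Int := r.getD i 0

-- ===== PORT A =====
def mergeLoopA (x_tol : Int) (merged : List (List Int)) : List (List Int) → List (List Int)
  | [] => merged
  | rect :: rs =>
    let last := merged.getLast?.getD []
    if pvIdx rect 0 - pvIdx last 2 ≤ x_tol then
      mergeLoopA x_tol (merged.dropLast ++
        [[min (pvIdx last 0) (pvIdx rect 0), min (pvIdx last 1) (pvIdx rect 1),
          max (pvIdx last 2) (pvIdx rect 2), max (pvIdx last 3) (pvIdx rect 3)]]) rs
    else
      mergeLoopA x_tol (merged ++ [rect]) rs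

def merge_close_rects (line : List (List Int)) (x_tol : Int) : List (List Int) :=
  match line with
  | [] => []
  | h :: t => mergeLoopA x_tol [h] t

-- ===== PORT B =====
-- Python's min/max over a non-empty sequence, as Source B's generator expressions compute them
def pminL : List Int → Int
  | [] => 0
  | h :: t => t.foldl min h

def pmaxL : List Int → Int
  | [] => 0
  | h :: t => t.foldl max h

def boxOf (g : List (List Int)) : List Int :=
  [pminL (g.map (fun r => pvIdx r 0)), pminL (g.map (fun r => pvIdx r 1)),
   pmaxL (g.map (fun r => pvIdx r 2)), pmaxL (g.map (fun r => pvIdx r 3))]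

-- second pass: singleton group passes through unchanged, larger groups become a bounding box
def summG (g : List (List Int)) : List Int :=
  if g.length = 1 then g.headI else boxOf g

-- first pass: split into groups of close rects, tracking the running right edge
def groupLoopB (x_tol : Int) (groups : List (List (List Int))) (right : Int) :
    List (List Int) → List (List (List Int))
  | [] => groups
  | rect :: rs =>
    if groups ≠ [] ∧ pvIdx rect 0 - right ≤ x_tol then
      groupLoopB x_tol (groups.dropLast ++ [(groups.getLast?.getD []) ++ [rect]])
        (max right (pvIdx rect 2)) rs
    else
      groupLoopB x_tol (groups ++ [[rect]]) (pvIdx rect 2) rs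

def merge_close_rects_alt (line : List (List Int)) (x_tol : Int) : List (List Int) :=
  (groupLoopB x_tol [] 0 line).map summG

-- ===== PRECONDITION & SPEC =====
-- Pre_ admits lines whose rects all have ≥ 4 coordinates, and also lines of rects with
-- ≥ 3 coordinates when no adjacent pair is close (so no merge ever reads a 4th entry);
-- it excludes the remaining malformed lines (a rect with too few coordinates), on which
-- A raises IndexError except in degenerate positions (a lone or trailing short rect,
-- where B's own grouping pass raises instead).
def Pre_merge_close_rects (line : List (List Int)) (x_tol : Int) : Prop :=
  (∀ r ∈ line, 4 ≤ r.length) ∨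
    ((∀ r ∈ line, 3 ≤ r.length) ∧
      ∀ p ∈ line.zip line.tail, x_tol < p.2.getD 0 0 - p.1.getD 2 0)
instance (line : List (List Int)) (x_tol : Int) : Decidable (Pre_merge_close_rects line x_tol) := by unfold Pre_merge_close_rects; infer_instance

def pvWitness_merge_close_rects : List (List Int) × Int :=
  ([[0, 0, 10, 5], [15, 1, 25, 6], [100, 0, 110, 4]], 10)

def Spec_merge_close_rects (line : List (List Int)) (x_tol : Int) (out : List (List Int)) : Prop := out = merge_close_rects_alt line x_tol
instance (line : List (List Int)) (x_tol : Int) (out : List (List Int)) : Decidable (Spec_merge_close_rects line x_tol out) := by unfold Spec_merge_close_rects; infer_instance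

-- ===== CLAIM (what is proved, stated in full; the proofs are below) =====
def Claim_equal_merge_close_rects : Prop := ∀ (line : List (List Int)) (x_tol : Int), Dom_merge_close_rects line x_tol → Pre_merge_close_rects line x_tol → Spec_merge_close_rects line x_tol (merge_close_rects line x_tol)

-- ===== LEMMAS AND PROOFS =====
lemma pminL_snoc (xs : List Int) (y : Int) (h : xs ≠ []) :
    pminL (xs ++ [y]) = min (pminL xs) y := by
  cases xs with
  | nil => exact absurd rfl h
  | cons a t => simp [pminL, List.foldl_append]

lemma pmaxL_snoc (xs : List Int) (y : Int) (h : xs ≠ []) :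
    pmaxL (xs ++ [y]) = max (pmaxL xs) y := by
  cases xs with
  | nil => exact absurd rfl h
  | cons a t => simp [pmaxL, List.foldl_append]

lemma summG_snoc (g : List (List Int)) (r : List Int) (hg : g ≠ []) :
    summG (g ++ [r]) =
      [min (pvIdx (summG g) 0) (pvIdx r 0), min (pvIdx (summG g) 1) (pvIdx r 1),
       max (pvIdx (summG g) 2) (pvIdx r 2), max (pvIdx (summG g) 3) (pvIdx r 3)] := by
  cases g with
  | nil => exact absurd rfl hg
  | cons a t =>
    cases t with
    | nil => simp [summG, boxOf, pminL, pmaxL, pvIdx]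
    | cons b t2 =>
      have hne : ∀ f : List Int → Int, (a :: b :: t2).map f ≠ [] := by simp
      simp only [summG, List.length_append, List.length_cons, List.map_append, List.map_cons,
        List.map_nil, boxOf]
      have h1 := pminL_snoc ((a :: b :: t2).map (fun r => pvIdx r 0)) (pvIdx r 0) (hne _)
      have h2 := pminL_snoc ((a :: b :: t2).map (fun r => pvIdx r 1)) (pvIdx r 1) (hne _)
      have h3 := pmaxL_snoc ((a :: b :: t2).map (fun r => pvIdx r 2)) (pvIdx r 2) (hne _)
      have h4 := pmaxL_snoc ((a :: b :: t2).map (fun r => pvIdx r 3)) (pvIdx r 3) (hne _)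
      simp only [List.map_cons, pvIdx, List.getD_eq_getElem?_getD, List.cons_append,
        List.nil_append] at h1 h2 h3 h4
      simp [h1, h2, h3, h4, pvIdx, List.getD_eq_getElem?_getD]

lemma pvIdx2_summG_snoc (g : List (List Int)) (r : List Int) (hg : g ≠ []) :
    pvIdx (summG (g ++ [r])) 2 = max (pvIdx (summG g) 2) (pvIdx r 2) := by
  rw [summG_snoc g r hg]; simp [pvIdx]

lemma loop_inv (x_tol : Int) (rest : List (List Int)) :
    ∀ (gs : List (List (List Int))) (g : List (List Int)) (right : Int),
      g ≠ [] → right = pvIdx (summG g) 2 →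
      mergeLoopA x_tol ((gs ++ [g]).map summG) rest =
        (groupLoopB x_tol (gs ++ [g]) right rest).map summG := by
  induction rest with
  | nil => intro gs g right _ _; simp [mergeLoopA, groupLoopB]
  | cons rect rs ih =>
    intro gs g right hg hr
    have hlast : ((gs ++ [g]).map summG).getLast?.getD [] = summG g := by
      simp [List.map_append]
    have hdrop : ((gs ++ [g]).map summG).dropLast = gs.map summG := by
      simp [List.map_append]
    simp only [mergeLoopA, groupLoopB, hlast, hdrop]
    by_cases hc : pvIdx rect 0 - pvIdx (summG g) 2 ≤ x_tol
    · have hc' : (gs ++ [g] ≠ [] ∧ pvIdx rect 0 - right ≤ x_tol) := by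
        refine ⟨by simp, ?_⟩; rw [hr]; exact hc
      rw [if_pos hc, if_pos hc']
      have hgl : (gs ++ [g]).getLast?.getD [] = g := by simp
      have hgd : (gs ++ [g]).dropLast = gs := by simp
      rw [hgl, hgd]
      have hnew : gs.map summG ++
          [[min (pvIdx (summG g) 0) (pvIdx rect 0), min (pvIdx (summG g) 1) (pvIdx rect 1),
            max (pvIdx (summG g) 2) (pvIdx rect 2), max (pvIdx (summG g) 3) (pvIdx rect 3)]] =
          (gs ++ [g ++ [rect]]).map summG := by
        rw [List.map_append]; simp [summG_snoc g rect hg]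
      rw [hnew, hr, ← pvIdx2_summG_snoc g rect hg]
      exact ih gs (g ++ [rect]) _ (by simp) rfl
    · have hc' : ¬ (gs ++ [g] ≠ [] ∧ pvIdx rect 0 - right ≤ x_tol) := by
        rw [hr]; intro h; exact hc h.2
      rw [if_neg hc, if_neg hc']
      have h1 : (gs ++ [g]).map summG ++ [rect] = ((gs ++ [g]) ++ [[rect]]).map summG := by
        rw [List.map_append]; simp [summG]
      rw [h1]
      exact ih (gs ++ [g]) [rect] _ (by simp) (by simp [summG, pvIdx])

-- ===== VERDICT (by name: the statement is the Claim_ definition above) =====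
theorem merge_close_rects_spec : Claim_equal_merge_close_rects := by
  intro line x_tol _ _
  unfold Spec_merge_close_rects merge_close_rects merge_close_rects_alt
  cases line with
  | nil => simp [groupLoopB]
  | cons h t =>
    have hstep : groupLoopB x_tol [] 0 (h :: t) = groupLoopB x_tol [[h]] (pvIdx h 2) t := by
      simp [groupLoopB]
    rw [hstep]
    have := loop_inv x_tol t [] [h] (pvIdx h 2) (by simp) (by simp [summG, pvIdx])
    simpa [summG] using this
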